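-- pv_equiv track=rewrite | github.com/issaccv/jsonl-annotations | annotation_tool/renderers.py | _render_parameter_annotation
-- ===== SOURCE A (Python) =====
-- from typing import Any
--
-- def _render_parameter_annotation(prop: Any) -> str:
--     if not isinstance(prop, dict):
--         return "Any"
--     type_name = prop.get("type")
--     if isinstance(type_name, str) and type_name:
--         return type_name
--     if isinstance(type_name, list):
--         rendered = [item for item in type_name if isinstance(item, str) and item]
--         if rendered:
--             return " | ".join(rendered)
--     return "Any"
-- ===== SOURCE B (Python) =====
-- from typing import Any, Optional
--
--
-- def _join_types(items: Any) -> Optional[str]: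
--     """Recursively join the usable (non-empty str) items with ' | ';
--     None means no usable item in the whole tail."""
--     if not items:
--         return None
--     head = items[0]
--     tail = _join_types(items[1:])
--     if not (isinstance(head, str) and head):
--         return tail
--     return head if tail is None else head + " | " + tail
--
--
-- def _render_parameter_annotation(prop: Any) -> str:
--     if not isinstance(prop, dict):
--         return "Any"
--     type_name = prop.get("type")
--     if isinstance(type_name, str):
--         type_name = [type_name]
--     elif not isinstance(type_name, list):
--         type_name = []
--     joined = _join_types(type_name)
--     return "Any" if joined is None else joined
-- ===== Notes on version B (the rewrite author's own statement) =====
-- stated objective: alternative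
-- what changed: Replaces A's two staged passes (a filter comprehension followed by str.join, in separate str/list branches) with a single structural recursion over the normalized list that merges each head with the Optional join of its tail, returning None when nothing is usable.
import Mathlib
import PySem

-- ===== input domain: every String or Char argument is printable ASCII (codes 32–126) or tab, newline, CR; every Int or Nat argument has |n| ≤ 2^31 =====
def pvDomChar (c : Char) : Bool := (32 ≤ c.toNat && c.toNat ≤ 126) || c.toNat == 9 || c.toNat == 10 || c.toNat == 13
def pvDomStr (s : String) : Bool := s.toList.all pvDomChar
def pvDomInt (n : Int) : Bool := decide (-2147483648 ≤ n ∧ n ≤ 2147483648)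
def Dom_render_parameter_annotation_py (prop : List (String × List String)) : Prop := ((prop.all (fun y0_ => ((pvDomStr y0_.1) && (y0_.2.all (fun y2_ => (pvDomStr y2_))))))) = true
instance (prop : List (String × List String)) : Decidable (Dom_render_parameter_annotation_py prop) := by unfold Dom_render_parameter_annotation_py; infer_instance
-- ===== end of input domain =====

-- B replaces A's staged filter-then-join with one structural recursion over the list that
-- merges each head with the Optional join of its tail; objective: alternative decomposition (same cost).

-- ===== PORT A =====
-- Under the type convention prop : dict[str, list[str]], so prop is always a dict and
-- type_name (if present) is always a list, never a str: the `isinstance(prop, dict)` guard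
-- and the `isinstance(type_name, str)` branch are identically dead here and drop out;
-- `isinstance(item, str)` inside the comprehension is identically True and drops out too.
def render_parameter_annotation_py (prop : List (String × List String)) : String :=
  match (PySem.Dict.ofList prop).get? "type" with
  | none => "Any"
  | some type_name =>
    let rendered := type_name.filter (fun item => item != "")
    if !rendered.isEmpty then PySem.Str.join " | " rendered else "Any"

-- ===== PORT B =====
-- Source B's recursive helper _join_types (the `isinstance(head, str)` test is identically true here)
def pvJoinTypes : List String → Option String
  | [] => none
  | head :: rest =>
    let tail := pvJoinTypes rest
    if head == "" then tail
    else match tail with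
      | none => some head
      | some s => some (head ++ " | " ++ s)

def render_parameter_annotation_py_alt (prop : List (String × List String)) : String :=
  let type_name := (PySem.Dict.ofList prop).getD "type" []
  match pvJoinTypes type_name with
  | none => "Any"
  | some joined => joined

-- ===== PRECONDITION & SPEC =====
def Spec_render_parameter_annotation_py (prop : List (String × List String)) (out : String) : Prop := out = render_parameter_annotation_py_alt prop
instance (prop : List (String × List String)) (out : String) : Decidable (Spec_render_parameter_annotation_py prop out) := by unfold Spec_render_parameter_annotation_py; infer_instance

-- ===== CLAIM (what is proved, stated in full; the proofs are below) =====
def Claim_equal_render_parameter_annotation_py : Prop := ∀ (prop : List (String × List String)), Dom_render_parameter_annotation_py prop → Spec_render_parameter_annotation_py prop (render_parameter_annotation_py prop)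

-- ===== LEMMAS AND PROOFS =====

theorem pv_join_singleton (h : String) : PySem.Str.join " | " [h] = h := by
  apply String.ext
  simp [PySem.Str.toList_join, PySem.Chars.join_singleton]

theorem pv_join_cons (h y : String) (r : List String) :
    PySem.Str.join " | " (h :: y :: r) = h ++ " | " ++ PySem.Str.join " | " (y :: r) := by
  apply String.ext
  simp [PySem.Str.toList_join, PySem.Chars.join_cons_cons, String.toList_append, List.append_assoc]

theorem pv_joinTypes_eq (l : List String) :
    pvJoinTypes l =
      match l.filter (fun item => item != "") with
      | [] => none
      | f => some (PySem.Str.join " | " f) := by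
  induction l with
  | nil => rfl
  | cons h t ih =>
    by_cases hh : h = ""
    · subst hh
      simpa [pvJoinTypes] using ih
    · have hh' : (h != "") = true := by simp [hh]
      simp only [pvJoinTypes, List.filter_cons, hh', if_pos, show (h == "") = false by simp [hh]]
      rw [ih]
      cases hft : t.filter (fun item => item != "") with
      | nil => simp [pv_join_singleton]
      | cons y r => simp [pv_join_cons]

-- ===== VERDICT (by name: the statement is the Claim_ definition above) =====
theorem render_parameter_annotation_py_spec : Claim_equal_render_parameter_annotation_py := by
  intro prop _
  unfold Spec_render_parameter_annotation_py
  unfold render_parameter_annotation_py render_parameter_annotation_py_alt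
  have hgetD : (PySem.Dict.ofList prop).getD "type" [] =
      ((PySem.Dict.ofList prop).get? "type").getD [] := by
    simp [PySem.Dict.getD]
  cases hg : (PySem.Dict.ofList prop).get? "type" with
  | none => simp [hgetD, hg, pvJoinTypes]
  | some l =>
    simp only [hgetD, hg, Option.getD_some, pv_joinTypes_eq]
    cases hfl : l.filter (fun item => item != "") with
    | nil => simp
    | cons y r => simp
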